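-- pv_equiv track=rewrite | github.com/flamesuserresource3/backend-repo_1bsxatot_pggijs | main.py | tipo_disc
-- ===== SOURCE A (Python) =====
-- from typing import List, Optional, Dict
--
-- def tipo_disc(scores: Dict[str, int]) -> str:
--     if not scores:
--         return "Indefinido"
--     # Empate: retorna combinação ordenada
--     max_val = max(scores.values()) if scores else 0
--     dominantes = [k for k, v in scores.items() if v == max_val and v > 0]
--     if not dominantes:
--         return "Indefinido"
--     return "+".join(sorted(dominantes))
-- ===== SOURCE B (Python) =====
-- def tipo_disc(scores):
--     best = None
--     keys = []
--     for k, v in scores.items():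
--         if best is None or v > best:
--             best = v
--             keys = [k]
--         elif v == best:
--             keys.append(k)
--     if best is None or best <= 0:
--         return "Indefinido"
--     return "+".join(sorted(keys))
-- ===== Notes on version B (the rewrite author's own statement) =====
-- stated objective: alternative
-- what changed: Replaces the max()-then-comprehension two-pass structure with a single pass that maintains the running maximum and the incremental tie-set of keys, deciding 'Indefinido' from the final best value.
import Mathlib
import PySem

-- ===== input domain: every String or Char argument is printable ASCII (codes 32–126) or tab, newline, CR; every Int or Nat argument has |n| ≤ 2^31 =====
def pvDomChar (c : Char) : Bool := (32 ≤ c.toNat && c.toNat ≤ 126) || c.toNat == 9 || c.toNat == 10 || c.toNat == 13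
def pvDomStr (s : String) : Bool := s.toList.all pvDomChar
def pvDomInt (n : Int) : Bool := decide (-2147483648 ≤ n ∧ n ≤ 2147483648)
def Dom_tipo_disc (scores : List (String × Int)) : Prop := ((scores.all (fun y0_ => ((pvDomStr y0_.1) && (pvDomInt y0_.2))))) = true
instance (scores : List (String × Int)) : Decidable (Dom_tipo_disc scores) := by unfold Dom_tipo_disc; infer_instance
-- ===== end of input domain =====

-- B fuses A's max()-then-filter two-pass structure into a single pass keeping a running maximum and the incremental tie-set of keys (alternative decomposition, same cost).


-- ===== PORT A =====
def tipo_disc (scores : List (String × Int)) : String :=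
  if scores = [] then "Indefinido"
  else
    let max_val : Int := (PySem.List.max? (scores.map (·.2)) (fun v => v)).getD 0
    let dominantes : List String :=
      (scores.filter (fun p => p.2 == max_val && decide (p.2 > 0))).map (·.1)
    if dominantes = [] then "Indefinido"
    else PySem.Str.join "+" (PySem.List.sorted dominantes (fun k => k) false)

-- ===== PORT B =====
def tipoDiscStep (st : Option Int × List String) (p : String × Int) : Option Int × List String :=
  match st with
  | (none, _) => (some p.2, [p.1])
  | (some b, ks) =>
      if p.2 > b then (some p.2, [p.1])
      else if p.2 == b then (some b, ks ++ [p.1])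
      else (some b, ks)

def tipo_disc_alt (scores : List (String × Int)) : String :=
  match scores.foldl tipoDiscStep (none, []) with
  | (none, _) => "Indefinido"
  | (some b, ks) =>
      if b ≤ 0 then "Indefinido"
      else PySem.Str.join "+" (PySem.List.sorted ks (fun k => k) false)

-- ===== PRECONDITION & SPEC =====
def Spec_tipo_disc (scores : List (String × Int)) (out : String) : Prop := out = tipo_disc_alt scores
instance (scores : List (String × Int)) (out : String) : Decidable (Spec_tipo_disc scores out) := by unfold Spec_tipo_disc; infer_instance

-- ===== CLAIM (what is proved, stated in full; the proofs are below) =====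
def Claim_equal_tipo_disc : Prop := ∀ (scores : List (String × Int)), Dom_tipo_disc scores → Spec_tipo_disc scores (tipo_disc scores)

-- ===== LEMMAS AND PROOFS =====

/-- The running max really is the fold of `max` over the seen values. -/
lemma le_foldl_max_vals (l : List Int) (b : Int) : b ≤ l.foldl max b := by
  induction l generalizing b with
  | nil => simp
  | cons v t ih => exact le_trans (le_max_left b v) (ih (max b v))

/-- The fold of `max` is attained: it is the seed or some element. -/
lemma foldl_max_attained (l : List Int) (b : Int) :
    l.foldl max b = b ∨ l.foldl max b ∈ l := by
  induction l generalizing b with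
  | nil => simp
  | cons v t ih =>
    rcases ih (max b v) with h | h
    · rcases max_choice b v with hb | hv
      · left; simpa [List.foldl, hb] using h
      · right; simp [List.foldl]; left; rw [h, hv]
    · right; simp [List.foldl]; right; exact h

/-- Invariant of B's single pass, started in a live state `(some b, ks)`:
    the best value becomes the fold-max of the values, and the key list becomes
    the keys of the entries whose value equals that final max, prefixed by `ks`
    exactly when the max never moved. -/
lemma foldl_step_spec (l : List (String × Int)) (b : Int) (ks : List String) :
    l.foldl tipoDiscStep (some b, ks) =
      (some ((l.map (·.2)).foldl max b),
       (if (l.map (·.2)).foldl max b = b then ks else []) ++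
         (l.filter (fun p => p.2 == (l.map (·.2)).foldl max b)).map (·.1)) := by
  induction l generalizing b ks with
  | nil => simp
  | cons p t ih =>
    obtain ⟨k, v⟩ := p
    simp only [List.map_cons, List.foldl_cons, List.filter_cons]
    by_cases hgt : v > b
    · have hmax : max b v = v := max_eq_right (le_of_lt hgt)
      rw [show tipoDiscStep (some b, ks) (k, v) = (some v, [k]) from by
        simp [tipoDiscStep, hgt]]
      rw [ih v [k]]
      simp only [hmax]
      have hvle : v ≤ (t.map (·.2)).foldl max v := le_foldl_max_vals _ _
      rw [if_neg (show ¬ (t.map (·.2)).foldl max v = b by omega)]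
      by_cases hv : (t.map (·.2)).foldl max v = v
      · rw [if_pos hv, show (v == (t.map (·.2)).foldl max v) = true by simp [hv]]
        simp
      · rw [if_neg hv, show (v == (t.map (·.2)).foldl max v) = false by
          simp; omega]
        simp
    · have hmax : max b v = b := max_eq_left (by omega)
      have hble : b ≤ (t.map (·.2)).foldl max b := le_foldl_max_vals _ _
      simp only [hmax]
      by_cases heq : v = b
      · rw [show tipoDiscStep (some b, ks) (k, v) = (some b, ks ++ [k]) from by
          simp [tipoDiscStep, heq]]
        rw [ih b (ks ++ [k])]
        by_cases hMb : (t.map (·.2)).foldl max b = b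
        · rw [if_pos hMb, if_pos hMb,
            show (v == (t.map (·.2)).foldl max b) = true by simp [heq, hMb]]
          simp
        · rw [if_neg hMb, if_neg hMb,
            show (v == (t.map (·.2)).foldl max b) = false by simp; omega]
          simp
      · rw [show tipoDiscStep (some b, ks) (k, v) = (some b, ks) from by
          simp [tipoDiscStep, hgt, heq]]
        rw [ih b ks,
          show (v == (t.map (·.2)).foldl max b) = false by simp; omega]
        simp

theorem tipo_disc_eq_alt (scores : List (String × Int)) :
    tipo_disc scores = tipo_disc_alt scores := by
  cases scores with
  | nil => rfl
  | cons p t =>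
    obtain ⟨k, v⟩ := p
    set M : Int := (t.map (·.2)).foldl max v with hM
    have hmax? : PySem.List.max? (((k, v) :: t).map (·.2)) (fun x => x) = some M := by
      simp [PySem.List.max?_id_cons, hM]
    have hvleM : v ≤ M := le_foldl_max_vals _ v
    have hBfold : ((k, v) :: t).foldl tipoDiscStep (none, []) =
        (some M, (((k, v) :: t).filter (fun p => p.2 == M)).map (·.1)) := by
      show t.foldl tipoDiscStep (some v, [k]) = _
      rw [foldl_step_spec t v [k], ← hM]
      simp only [List.filter_cons]
      by_cases hvM : v = M
      · rw [if_pos hvM.symm, show (v == M) = true by simp [hvM]]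
        simp
      · rw [if_neg (fun h => hvM h.symm), show (v == M) = false by simp [hvM]]
        simp
    have hattain : ∃ q ∈ (k, v) :: t, q.2 = M := by
      rcases foldl_max_attained (t.map (·.2)) v with h | h
      · exact ⟨(k, v), by simp, by rw [← hM] at h; omega⟩
      · rw [← hM] at h
        rcases List.mem_map.mp h with ⟨q, hq, hq2⟩
        exact ⟨q, List.mem_cons_of_mem _ hq, hq2⟩
    by_cases hMpos : M > 0
    · -- positive max: the two dominant-key lists coincide and both join them sorted
      have hfilter : ((k, v) :: t).filter (fun p => p.2 == M && decide (p.2 > 0)) =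
          ((k, v) :: t).filter (fun p => p.2 == M) := by
        apply List.filter_congr
        intro q _
        by_cases h : q.2 = M
        · simp [h, hMpos]
        · simp [h]
      have hne : (((k, v) :: t).filter (fun p => p.2 == M)).map (·.1) ≠ [] := by
        simp only [ne_eq, List.map_eq_nil_iff, List.filter_eq_nil_iff]
        intro hall
        obtain ⟨q, hq, hq2⟩ := hattain
        exact (hall q hq) (by simp [hq2])
      simp only [tipo_disc, tipo_disc_alt, hBfold]
      rw [if_neg (by simp)]
      simp only [hmax?, Option.getD_some, hfilter]
      rw [if_neg hne, if_neg (by omega)]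
    · -- nonpositive max: A's comprehension is empty, B's final check fails
      have hfilter : ((k, v) :: t).filter (fun p => p.2 == M && decide (p.2 > 0)) = [] := by
        apply List.filter_eq_nil_iff.mpr
        intro q _
        by_cases h : q.2 = M
        · simp [h]; omega
        · simp [h]
      simp only [tipo_disc, tipo_disc_alt, hBfold]
      rw [if_neg (by simp)]
      simp only [hmax?, Option.getD_some, hfilter]
      simp [if_pos (by omega : M ≤ 0)]

-- ===== VERDICT (by name: the statement is the Claim_ definition above) =====
theorem tipo_disc_spec : Claim_equal_tipo_disc := by
  intro scores _
  exact tipo_disc_eq_alt scores
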